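-- pv_equiv track=rewrite | github.com/stratocube/ProjectEuler | src/page3/Problem103.py | get_valid_sets
-- ===== SOURCE A (Python) =====
-- from itertools import combinations
-- from collections import defaultdict
--
-- def check_subsets(num_list):
--     combo_sums_by_size = defaultdict(set)
--     for subset_size in range(1, len(num_list)):
--         previous_max = max(combo_sums_by_size[subset_size-1], default=0)
--         for combination in combinations(num_list, subset_size):
--             combo_sum = sum(combination)
--             if combo_sum in combo_sums_by_size[subset_size]:
--                 return False
--             if combo_sum <= previous_max:
--                 return False
--
--             combo_sums_by_size[subset_size].add(combo_sum)
--     return True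
--
-- def get_valid_sets(set_size, max_num):
--     if set_size == 1:
--         return [[i] for i in range(1, max_num+1)]
--
--     valid_list = []
--     smaller_valid_list = get_valid_sets(set_size-1, max_num)
--     for smaller_valid in smaller_valid_list:
--         for i in range(max(smaller_valid)+1, max_num+1):
--             candidate = smaller_valid + [i]
--             if check_subsets(candidate):
--                 valid_list.append(candidate)
--
--     return valid_list
-- ===== SOURCE B (Python) =====
-- from itertools import combinations
-- from collections import defaultdict
--
--
-- def check_subsets(num_list):
--     combo_sums_by_size = defaultdict(set)
--     for subset_size in range(1, len(num_list)):
--         previous_max = max(combo_sums_by_size[subset_size-1], default=0)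
--         for combination in combinations(num_list, subset_size):
--             combo_sum = sum(combination)
--             if combo_sum in combo_sums_by_size[subset_size]:
--                 return False
--             if combo_sum <= previous_max:
--                 return False
--
--             combo_sums_by_size[subset_size].add(combo_sum)
--     return True
--
--
-- def get_valid_sets(set_size, max_num):
--     # iterative bottom-up: grow the level of valid sets one size at a time
--     level = [[i] for i in range(1, max_num + 1)]
--     for _ in range(2, set_size + 1):
--         next_level = []
--         for smaller in level:
--             for i in range(max(smaller) + 1, max_num + 1):
--                 candidate = smaller + [i]
--                 if check_subsets(candidate):
--                     next_level.append(candidate)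
--         level = next_level
--     return level
-- ===== Notes on version B (the rewrite author's own statement) =====
-- stated objective: alternative
-- what changed: get_valid_sets is rebuilt iteratively bottom-up: a level of valid sets is extended size by size in a loop instead of A's recursion on set_size; check_subsets is unchanged.
import Mathlib
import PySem

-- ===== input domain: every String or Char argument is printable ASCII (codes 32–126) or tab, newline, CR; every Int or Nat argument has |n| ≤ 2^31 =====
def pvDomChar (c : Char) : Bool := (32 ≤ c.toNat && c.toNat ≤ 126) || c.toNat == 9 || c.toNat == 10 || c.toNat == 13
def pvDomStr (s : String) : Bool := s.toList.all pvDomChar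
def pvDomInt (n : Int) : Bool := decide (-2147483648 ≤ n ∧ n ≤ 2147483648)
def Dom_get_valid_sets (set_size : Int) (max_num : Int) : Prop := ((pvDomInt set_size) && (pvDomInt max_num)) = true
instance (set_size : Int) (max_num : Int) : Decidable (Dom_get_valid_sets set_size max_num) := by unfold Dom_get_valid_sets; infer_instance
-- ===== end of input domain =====

-- B rewrites get_valid_sets iteratively bottom-up (a loop over sizes) instead of A's recursion;
-- check_subsets is shared unchanged by both Pythons, so both ports use the helpers below.
-- A mutates nothing; equivalence is about the return value.

-- ===== SHARED HELPERS (check_subsets, identical in Source A and Source B) =====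
-- inner 'for combination in combinations(...)' loop; none = early 'return False'
def pvCsInner : PySem.Set Int → Int → List (List Int) → Option (PySem.Set Int)
  | s, _, [] => some s
  | s, pm, c :: rest =>
    let combo_sum := c.sum
    if PySem.Set.contains s combo_sum then none
    else if combo_sum ≤ pm then none
    else pvCsInner (PySem.Set.add s combo_sum) pm rest

-- outer 'for subset_size in range(1, len(num_list))' loop over the defaultdict(set).
-- (defaultdict access also inserts an empty set; that insertion is unobservable here since
-- only getD with default [] reads the dict, so it is not modelled.)
def pvCsOuter : PySem.Dict Int (PySem.Set Int) → List Int → List Int → Bool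
  | _, _, [] => true
  | d, num_list, sz :: rest =>
    let previous_max := PySem.List.maxD (PySem.Dict.getD d (sz - 1) []) (fun x => x) 0
    match pvCsInner (PySem.Dict.getD d sz []) previous_max
        (PySem.List.combinations num_list sz.toNat) with
    | none => false
    | some s => pvCsOuter (PySem.Dict.insert d sz s) num_list rest

def check_subsets (num_list : List Int) : Bool :=
  pvCsOuter PySem.Dict.empty num_list (PySem.List.pyRange 1 (num_list.length : Int) 1)

-- ===== PORT A =====
-- recursive on set_size; for set_size < 1 Python recurses without bound (RecursionError),
-- excluded by Pre_; the port returns [] there as a placeholder.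
-- max(smaller_valid) is ported as maxD … 0: smaller_valid is never empty where it is reached.
def get_valid_sets (set_size : Int) (max_num : Int) : List (List Int) :=
  if set_size = 1 then
    (PySem.List.pyRange 1 (max_num + 1) 1).map (fun i => [i])
  else if set_size < 1 then
    []  -- Python: unbounded recursion (outside Pre_)
  else
    let smaller_valid_list := get_valid_sets (set_size - 1) max_num
    smaller_valid_list.foldl
      (fun valid_list smaller_valid =>
        (PySem.List.pyRange (PySem.List.maxD smaller_valid (fun x => x) 0 + 1) (max_num + 1) 1).foldl
          (fun valid_list i =>
            let candidate := smaller_valid ++ [i]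
            if check_subsets candidate then valid_list ++ [candidate] else valid_list)
          valid_list)
      []
termination_by set_size.toNat
decreasing_by omega

-- ===== PORT B =====
-- iterative: start from the size-1 level, then one pass per size in range(2, set_size+1)
def get_valid_sets_alt (set_size : Int) (max_num : Int) : List (List Int) :=
  (PySem.List.pyRange 2 (set_size + 1) 1).foldl
    (fun level _ =>
      level.foldl
        (fun next_level smaller =>
          (PySem.List.pyRange (PySem.List.maxD smaller (fun x => x) 0 + 1) (max_num + 1) 1).foldl
            (fun next_level i =>
              let candidate := smaller ++ [i]
              if check_subsets candidate then next_level ++ [candidate] else next_level)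
            next_level)
        [])
    ((PySem.List.pyRange 1 (max_num + 1) 1).map (fun i => [i]))

-- ===== PRECONDITION & SPEC =====
-- Pre_ excludes exactly set_size < 1, where A raises RecursionError.
def Pre_get_valid_sets (set_size : Int) (_max_num : Int) : Prop := 1 ≤ set_size
instance (set_size : Int) (max_num : Int) : Decidable (Pre_get_valid_sets set_size max_num) := by
  unfold Pre_get_valid_sets; infer_instance

def pvWitness_get_valid_sets : Int × Int := (3, 6)

def Spec_get_valid_sets (set_size : Int) (max_num : Int) (out : List (List Int)) : Prop := out = get_valid_sets_alt set_size max_num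
instance (set_size : Int) (max_num : Int) (out : List (List Int)) : Decidable (Spec_get_valid_sets set_size max_num out) := by unfold Spec_get_valid_sets; infer_instance

-- ===== CLAIM (what is proved, stated in full; the proofs are below) =====
def Claim_equal_get_valid_sets : Prop := ∀ (set_size : Int) (max_num : Int), Dom_get_valid_sets set_size max_num → Pre_get_valid_sets set_size max_num → Spec_get_valid_sets set_size max_num (get_valid_sets set_size max_num)


-- ===== LEMMAS AND PROOFS =====
lemma gvs_agree (max_num : Int) : ∀ (n : Int), 1 ≤ n →
    get_valid_sets n max_num = get_valid_sets_alt n max_num := by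
  intro n hn
  induction n, hn using Int.le_induction with
  | base =>
      rw [get_valid_sets]
      simp [get_valid_sets_alt]
  | succ n hn ih =>
      rw [get_valid_sets]
      rw [if_neg (by omega : ¬ n + 1 = 1), if_neg (by omega : ¬ n + 1 < 1),
        show n + 1 - 1 = n from by omega, ih]
      show _ = get_valid_sets_alt (n + 1) max_num
      unfold get_valid_sets_alt
      rw [PySem.List.pyRange_one_succ_right (by omega : (2:Int) ≤ n + 1), List.foldl_append]
      simp

-- ===== VERDICT (by name: the statement is the Claim_ definition above) =====
theorem get_valid_sets_spec : Claim_equal_get_valid_sets := by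
  intro s m _ hpre
  unfold Spec_get_valid_sets
  exact gvs_agree m s hpre
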